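-- pv_equiv track=rewrite | github.com/Anurag9000/Forest_Run | scripts/import_final_assets.py | near_any
-- ===== SOURCE A (Python) =====
-- def quantize(color: tuple[int, int, int, int]) -> tuple[int, int, int]:
--     return (color[0] // 16, color[1] // 16, color[2] // 16)
--
-- def near_any(color: tuple[int, int, int, int], palette: set[tuple[int, int, int]], tolerance: int = 1) -> bool:
--     if color[3] < 250:
--         return False
--     qr, qg, qb = quantize(color)
--     for pr, pg, pb in palette:
--         if abs(qr - pr) <= tolerance and abs(qg - pg) <= tolerance and abs(qb - pb) <= tolerance:
--             return True
--     return False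
-- ===== SOURCE B (Python) =====
-- def quantize(color):
--     return (color[0] // 16, color[1] // 16, color[2] // 16)
--
-- def near_any(color, palette, tolerance=1):
--     if color[3] < 250:
--         return False
--     qr, qg, qb = quantize(color)
--     rng = range(-tolerance, tolerance + 1)
--     return any((qr + dr, qg + dg, qb + db) in palette
--                for dr in rng for dg in rng for db in rng)
-- ===== Notes on version B (the rewrite author's own statement) =====
-- stated objective: alternative
-- what changed: Instead of scanning the palette and testing three absolute differences per entry, B enumerates the (2*tolerance+1)^3 neighbouring quantized cells of the color and tests each for membership in the palette, trading dependence on palette size for dependence on tolerance.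
-- outside the precondition, e.g. on near_any((0, 0, 0, 255), {(0, 0, 0), (1, 2)}, 5): A returns True, B returns True
import Mathlib
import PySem

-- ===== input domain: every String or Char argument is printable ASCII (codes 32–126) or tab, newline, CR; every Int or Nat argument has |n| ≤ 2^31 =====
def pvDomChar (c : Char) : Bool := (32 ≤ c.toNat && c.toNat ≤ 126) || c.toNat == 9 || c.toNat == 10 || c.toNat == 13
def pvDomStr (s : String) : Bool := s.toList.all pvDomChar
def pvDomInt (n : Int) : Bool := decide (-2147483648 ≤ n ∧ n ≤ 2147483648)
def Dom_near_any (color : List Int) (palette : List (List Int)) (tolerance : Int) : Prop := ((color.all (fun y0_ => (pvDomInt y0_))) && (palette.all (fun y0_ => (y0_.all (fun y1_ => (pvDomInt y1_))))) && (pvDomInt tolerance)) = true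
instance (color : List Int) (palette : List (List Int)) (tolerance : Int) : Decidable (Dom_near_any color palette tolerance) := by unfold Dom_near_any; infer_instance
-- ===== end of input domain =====

-- Alternative algorithm: B enumerates the (2*tolerance+1)^3 neighbouring quantized cells
-- and tests each for membership in the palette, instead of A's per-entry distance scan.


-- ===== PORT A =====
def quantizeA (color : List Int) : Int × Int × Int :=
  (PySem.Int.floordiv ((PySem.List.pyGet? color 0).getD 0) 16,
   PySem.Int.floordiv ((PySem.List.pyGet? color 1).getD 0) 16,
   PySem.Int.floordiv ((PySem.List.pyGet? color 2).getD 0) 16)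

def near_any (color : List Int) (palette : List (List Int)) (tolerance : Int) : Bool :=
  if (PySem.List.pyGet? color 3).getD 0 < 250 then false
  else
    let q := quantizeA color
    palette.any (fun p =>
      let pr := (PySem.List.pyGet? p 0).getD 0
      let pg := (PySem.List.pyGet? p 1).getD 0
      let pb := (PySem.List.pyGet? p 2).getD 0
      decide (|q.1 - pr| ≤ tolerance) && decide (|q.2.1 - pg| ≤ tolerance) &&
        decide (|q.2.2 - pb| ≤ tolerance))

-- ===== PORT B =====
def near_any_alt (color : List Int) (palette : List (List Int)) (tolerance : Int) : Bool :=
  if (PySem.List.pyGet? color 3).getD 0 < 250 then false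
  else
    let q := quantizeA color
    let rng := PySem.List.pyRange (-tolerance) (tolerance + 1) 1
    rng.any (fun dr => rng.any (fun dg => rng.any (fun db =>
      palette.contains [q.1 + dr, q.2.1 + dg, q.2.2 + db])))

-- ===== PRECONDITION & SPEC =====
-- Pre_ excludes colors with fewer than 4 components (A raises IndexError) and, when the
-- alpha test passes, palettes containing an entry that is not a 3-tuple, on which A either
-- raises ValueError or returns True depending on accidental set iteration order.
def Pre_near_any (color : List Int) (palette : List (List Int)) (tolerance : Int) : Prop :=
  4 ≤ color.length ∧
    ((PySem.List.pyGet? color 3).getD 0 < 250 ∨ ∀ p ∈ palette, p.length = 3)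
instance (color : List Int) (palette : List (List Int)) (tolerance : Int) : Decidable (Pre_near_any color palette tolerance) := by unfold Pre_near_any; infer_instance
def pvWitness_near_any : List Int × List (List Int) × Int := ([0, 0, 0, 255], [[0, 0, 0]], 1)

def Spec_near_any (color : List Int) (palette : List (List Int)) (tolerance : Int) (out : Bool) : Prop := out = near_any_alt color palette tolerance
instance (color : List Int) (palette : List (List Int)) (tolerance : Int) (out : Bool) : Decidable (Spec_near_any color palette tolerance out) := by unfold Spec_near_any; infer_instance

-- ===== CLAIM (what is proved, stated in full; the proofs are below) =====
def Claim_equal_near_any : Prop := ∀ (color : List Int) (palette : List (List Int)) (tolerance : Int), Dom_near_any color palette tolerance → Pre_near_any color palette tolerance → Spec_near_any color palette tolerance (near_any color palette tolerance)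

-- ===== LEMMAS AND PROOFS =====

theorem near_any_equiv (color : List Int) (palette : List (List Int)) (tolerance : Int)
    (hpre : Pre_near_any color palette tolerance) :
    near_any color palette tolerance = near_any_alt color palette tolerance := by
  obtain ⟨hlen, hpal⟩ := hpre
  unfold near_any near_any_alt
  by_cases halpha : (PySem.List.pyGet? color 3).getD 0 < 250
  · simp [halpha]
  · have hpal3 : ∀ p ∈ palette, p.length = 3 := hpal.resolve_left halpha
    simp only [if_neg halpha]
    rw [Bool.eq_iff_iff]
    simp only [List.any_eq_true, Bool.and_eq_true, decide_eq_true_eq,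
      PySem.List.mem_pyRange_one, List.contains_iff_mem]
    set q := quantizeA color with hq
    constructor
    · rintro ⟨p, hp, ⟨h1, h2⟩, h3⟩
      obtain ⟨a, b, c, rfl⟩ := List.length_eq_three.mp (hpal3 p hp)
      simp [PySem.List.pyGet?, PySem.List.pyIdx?, abs_le] at h1 h2 h3
      refine ⟨a - q.1, by omega, b - q.2.1, by omega, c - q.2.2, by omega, ?_⟩
      simpa using hp
    · rintro ⟨dr, hdr, dg, hdg, db, hdb, hp⟩
      refine ⟨_, hp, ?_⟩
      simp [PySem.List.pyGet?, PySem.List.pyIdx?, abs_le]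
      omega

-- ===== VERDICT (by name: the statement is the Claim_ definition above) =====
theorem near_any_spec : Claim_equal_near_any := by
  intro color palette tolerance _ hpre
  unfold Spec_near_any
  exact near_any_equiv color palette tolerance hpre
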